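-- pv_equiv track=rewrite | github.com/IKDrocket/Atcoder | atcoder.jp/abc097/arc097_a/Main.py | c_kth_substring
-- ===== SOURCE A (Python) =====
-- def c_kth_substring(S, K):
--     tmp = []
--     for i in range(len(S)):
--         for j in range(i + 1, i + K + 1):
--             if j <= len(S):
--                 tmp.append(S[i:j])
--     tmp = sorted(set(tmp))
--     ans = tmp[K - 1]
--     return ans
-- ===== SOURCE B (Python) =====
-- def _insert(best, sub):
--     # insert sub before the first element it is smaller than
--     for idx, x in enumerate(best):
--         if sub < x:
--             return best[:idx] + [sub] + best[idx:]
--     return best + [sub]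
--
--
-- def c_kth_substring(S, K):
--     # bounded partial selection: keep only the K smallest distinct substrings
--     # seen so far, in a sorted buffer; scan substrings by length, then position
--     best = []
--     for L in range(1, K + 1):
--         for i in range(len(S) - L + 1):
--             sub = S[i:i + L]
--             if len(best) == K and best[-1] <= sub:
--                 continue  # buffer full and sub not below its maximum: no change
--             if sub not in best:
--                 best = _insert(best, sub)[:K]
--     return best[K - 1]
-- ===== Notes on version B (the rewrite author's own statement) =====
-- stated objective: alternative
-- what changed: Instead of collecting every substring, deduplicating with set() and sorting the whole set before indexing, B makes a single scan over substrings (by length, then position) maintaining a sorted buffer of only the K smallest distinct substrings seen so far, rejecting in O(1) any substring not below the buffer's maximum, and returns the buffer's last entry.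
import Mathlib
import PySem

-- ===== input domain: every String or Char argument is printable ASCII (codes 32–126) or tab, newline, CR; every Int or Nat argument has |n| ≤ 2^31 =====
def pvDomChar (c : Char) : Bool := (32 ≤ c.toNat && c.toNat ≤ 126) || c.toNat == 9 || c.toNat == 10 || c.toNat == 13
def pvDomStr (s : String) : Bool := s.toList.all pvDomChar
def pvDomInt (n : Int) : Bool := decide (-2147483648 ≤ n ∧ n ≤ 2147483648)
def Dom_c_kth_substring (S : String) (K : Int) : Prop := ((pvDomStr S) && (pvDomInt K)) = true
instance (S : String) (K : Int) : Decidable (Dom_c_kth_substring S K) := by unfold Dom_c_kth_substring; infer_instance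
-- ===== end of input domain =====

-- B replaces A's collect-all + sorted(set)+index by a single scan (by length, then position)
-- that maintains a sorted buffer of the at-most-K smallest distinct substrings (alternative decomposition).

-- ===== PORT A =====
def c_kth_substring (S : String) (K : Int) : String :=
  let n : Int := PySem.Str.len S
  let tmp : List String :=
    (PySem.List.pyRange 0 n 1).foldl (fun tmp i =>
      (PySem.List.pyRange (i + 1) (i + K + 1) 1).foldl (fun tmp j =>
        if j ≤ n then tmp ++ [PySem.Str.slice S (some i) (some j)] else tmp) tmp) []
  let tmp2 : List String := PySem.List.sorted (PySem.Set.ofList tmp) (fun x => x) false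
  PySem.List.pyGetD tmp2 (K - 1) ""   -- tmp[K - 1]; Pre_ puts K - 1 in range

-- ===== PORT B =====
-- _insert: insert sub before the first element it is smaller than (linear scan)
def pvInsert (sub : String) : List String → List String
  | [] => [sub]
  | x :: xs => if sub < x then sub :: x :: xs else x :: pvInsert sub xs

def c_kth_substring_alt (S : String) (K : Int) : String :=
  let n : Int := PySem.Str.len S
  let best : List String :=
    (PySem.List.pyRange 1 (K + 1) 1).foldl (fun best L =>
      (PySem.List.pyRange 0 (n - L + 1) 1).foldl (fun best i =>
        let sub := PySem.Str.slice S (some i) (some (i + L))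
        if PySem.List.len best = K ∧ PySem.List.pyGetD best (-1) "" ≤ sub then best
        else if sub ∈ best then best
        else PySem.List.slice (pvInsert sub best) none (some K)) best) []
  PySem.List.pyGetD best (K - 1) ""   -- best[K - 1]; Pre_ puts K - 1 in range

-- ===== PRECONDITION & SPEC =====
-- the distinct substrings of S of length between 1 and K (helper for Pre_ only;
-- the length range is capped at len(S) — longer substrings do not exist — so this
-- evaluates quickly even for huge K)
def pvSubs (S : String) (K : Int) : List String :=
  PySem.List.dedup ((PySem.List.pyRange 1 (min (K + 1) (PySem.Str.len S + 1)) 1).flatMap (fun L =>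
    (PySem.List.pyRange 0 (PySem.Str.len S - L + 1) 1).map (fun i =>
      PySem.Str.slice S (some i) (some (i + L)))))

-- A raises IndexError iff K < 1 or S has fewer than K distinct substrings of length ≤ K (B raises there too)
def Pre_c_kth_substring (S : String) (K : Int) : Prop :=
  1 ≤ K ∧ K ≤ (pvSubs S K).length
instance (S : String) (K : Int) : Decidable (Pre_c_kth_substring S K) := by
  unfold Pre_c_kth_substring; infer_instance

def pvWitness_c_kth_substring : String × Int := ("ab", 2)

def Spec_c_kth_substring (S : String) (K : Int) (out : String) : Prop := out = c_kth_substring_alt S K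
instance (S : String) (K : Int) (out : String) : Decidable (Spec_c_kth_substring S K out) := by
  unfold Spec_c_kth_substring; infer_instance

-- ===== CLAIM (what is proved, stated in full; the proofs are below) =====
def Claim_equal_c_kth_substring : Prop := ∀ (S : String) (K : Int), Dom_c_kth_substring S K → Pre_c_kth_substring S K → Spec_c_kth_substring S K (c_kth_substring S K)

-- ===== LEMMAS AND PROOFS =====

theorem pvInsert_perm (sub : String) (l : List String) : (pvInsert sub l).Perm (sub :: l) := by
  induction l with
  | nil => simp [pvInsert]
  | cons x xs ih =>
    simp only [pvInsert]
    split
    · exact List.Perm.refl _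
    · exact (List.Perm.cons x ih).trans (List.Perm.swap _ _ _)

theorem mem_pvInsert {a sub : String} {l : List String} :
    a ∈ pvInsert sub l ↔ a = sub ∨ a ∈ l := by
  rw [(pvInsert_perm sub l).mem_iff]; simp

theorem pairwise_pvInsert {sub : String} {l : List String}
    (hp : l.Pairwise (· < ·)) (hm : sub ∉ l) : (pvInsert sub l).Pairwise (· < ·) := by
  induction l with
  | nil => simp [pvInsert]
  | cons x xs ih =>
    simp only [pvInsert]
    rcases List.pairwise_cons.1 hp with ⟨hx, hxs⟩
    split
    · rename_i hlt
      refine List.pairwise_cons.2 ⟨?_, hp⟩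
      intro y hy
      rcases List.mem_cons.1 hy with h | h
      · exact h ▸ hlt
      · exact lt_trans hlt (hx y h)
    · rename_i hnlt
      have hne : x ≠ sub := fun h => hm (h ▸ List.mem_cons_self ..)
      have hxlt : x < sub := lt_of_le_of_ne (not_lt.1 hnlt) hne
      refine List.pairwise_cons.2 ⟨?_, ih hxs (fun h => hm (List.mem_cons_of_mem _ h))⟩
      intro y hy
      rcases mem_pvInsert.1 hy with h | h
      · exact h ▸ hxlt
      · exact hx y h

theorem pvInsert_append {sub : String} {l : List String}
    (h : ∀ y ∈ l, y < sub) : pvInsert sub l = l ++ [sub] := by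
  induction l with
  | nil => simp [pvInsert]
  | cons x xs ih =>
    have hx : x < sub := h x (List.mem_cons_self ..)
    simp only [pvInsert, if_neg (not_lt.2 hx.le)]
    simp [ih (fun y hy => h y (List.mem_cons_of_mem _ hy))]

theorem take_pvInsert_take (sub : String) (l : List String) (k : Nat) :
    (pvInsert sub (l.take k)).take k = (pvInsert sub l).take k := by
  induction l generalizing k with
  | nil => simp
  | cons x xs ih =>
    cases k with
    | zero => simp
    | succ k =>
      simp only [List.take_succ_cons, pvInsert]
      split
      · cases k with
        | zero => simp
        | succ m =>
          have hmin : min m (m + 1) = m := Nat.min_eq_left (Nat.le_succ m)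
          simp [List.take_take]
      · simp [ih k]

-- B's step function (proof helper)
def pvStep (K : Int) (best : List String) (sub : String) : List String :=
  if sub ∈ best then best else PySem.List.slice (pvInsert sub best) none (some K)

-- B's step function with the early-rejection guard, as written in Source B
def pvStepF (K : Int) (best : List String) (sub : String) : List String :=
  if PySem.List.len best = K ∧ PySem.List.pyGetD best (-1) "" ≤ sub then best
  else pvStep K best sub

-- on a strictly sorted buffer the guard never changes the result
theorem pvStepF_eq (K : Int) (best : List String) (sub : String)
    (h : best.Pairwise (· < ·)) : pvStepF K best sub = pvStep K best sub := by
  unfold pvStepF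
  split
  · rename_i hg
    obtain ⟨hlen, hle⟩ := hg
    have hK0 : 0 ≤ K := by
      rw [← hlen, PySem.List.len_eq]; positivity
    have hKn : K.toNat = best.length := by
      rw [← hlen, PySem.List.len_eq]; simp
    by_cases hmem : sub ∈ best
    · simp [pvStep, hmem]
    · rcases List.eq_nil_or_concat best with rfl | ⟨ys, l, rfl⟩
      · simp [pvStep, PySem.List.slice_to _ hK0, hKn, pvInsert]
      · rw [List.concat_eq_append] at *
        rw [PySem.List.pyGetD_neg_one_append_singleton] at hle
        have hlsub : l < sub :=
          lt_of_le_of_ne hle (fun e => hmem (e ▸ List.mem_append_right ys (List.mem_singleton_self l)))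
        have hall : ∀ y ∈ ys ++ [l], y < sub := by
          intro y hy
          rcases List.mem_append.1 hy with hy | hy
          · exact lt_trans ((List.pairwise_append.1 h).2.2 y hy l (List.mem_singleton_self l)) hlsub
          · rw [List.mem_singleton.1 hy]; exact hlsub
        rw [pvStep, if_neg hmem, pvInsert_append hall, PySem.List.slice_to _ hK0,
            List.take_append_of_le_length (by rw [hKn]), List.take_of_length_le (by rw [hKn])]
  · rfl

-- the raw (undeduplicated) substring stream B scans
def pvRaw (S : String) (K : Int) : List String :=
  (PySem.List.pyRange 1 (K + 1) 1).flatMap (fun L =>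
    (PySem.List.pyRange 0 (PySem.Str.len S - L + 1) 1).map (fun i =>
      PySem.Str.slice S (some i) (some (i + L))))

-- the raw substring stream A collects
def pvListA (S : String) (K : Int) : List String :=
  (PySem.List.pyRange 0 (PySem.Str.len S) 1).flatMap (fun i =>
    ((PySem.List.pyRange (i + 1) (i + K + 1) 1).filter
        (fun j => decide (j ≤ PySem.Str.len S))).map
      (fun j => PySem.Str.slice S (some i) (some j)))

-- invariant of B's scan: the buffer is the K smallest distinct elements seen, sorted
theorem pvFold_inv (K : Int) (hK : 0 ≤ K) (xs : List String) :
    xs.foldl (pvStepF K) [] =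
      (PySem.List.sorted (PySem.Set.ofList xs) (fun x => x) false).take K.toNat := by
  induction xs using List.reverseRecOn with
  | nil => simp [PySem.Set.ofList, PySem.List.sorted]
  | append_singleton xs x ih =>
    rw [List.foldl_append, List.foldl_cons, List.foldl_nil, ih]
    have hpair : (PySem.List.sorted (PySem.Set.ofList xs) (fun x => x) false).Pairwise (· < ·) :=
      PySem.List.sorted_ofList_pairwise_lt xs
    set s := PySem.List.sorted (PySem.Set.ofList xs) (fun x => x) false with hs
    rw [pvStepF_eq _ _ _ (hpair.sublist (List.take_sublist _ _))]
    by_cases hx : x ∈ xs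
    · rw [PySem.Set.ofList_append_singleton, PySem.Set.add_of_mem ((PySem.Set.mem_ofList _ _).2 hx)]
      unfold pvStep
      by_cases hxt : x ∈ s.take K.toNat
      · rw [if_pos hxt]
      · rw [if_neg hxt, PySem.List.slice_to _ hK]
        have hxs : x ∈ s := (PySem.List.mem_sorted ..).2 ((PySem.Set.mem_ofList _ _).2 hx)
        have hxd : x ∈ s.drop K.toNat := by
          have h1 : x ∈ s.take K.toNat ++ s.drop K.toNat := by
            rw [List.take_append_drop]; exact hxs
          rcases List.mem_append.1 h1 with h | h
          · exact absurd h hxt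
          · exact h
        have hlt : ∀ y ∈ s.take K.toNat, y < x := by
          have hp : (s.take K.toNat ++ s.drop K.toNat).Pairwise (· < ·) := by
            rw [List.take_append_drop]; exact hpair
          intro y hy
          exact (List.pairwise_append.1 hp).2.2 y hy x hxd
        have hklt : K.toNat < s.length := by
          by_contra hge
          rw [List.drop_eq_nil_of_le (Nat.le_of_not_lt hge)] at hxd
          exact absurd hxd (List.not_mem_nil)
        rw [pvInsert_append hlt,
            List.take_append_of_le_length (by simp [List.length_take]; omega),
            List.take_take]
        simp [← hs]
    · have hxs : x ∉ s := fun h => hx ((PySem.Set.mem_ofList _ _).1 ((PySem.List.mem_sorted ..).1 h))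
      have hxt : x ∉ s.take K.toNat := fun h => hxs (List.mem_of_mem_take h)
      unfold pvStep
      rw [if_neg hxt, PySem.List.slice_to _ hK, take_pvInsert_take]
      congr 1
      rw [PySem.Set.ofList_append_singleton,
          PySem.Set.add_of_not_mem (fun h => hx ((PySem.Set.mem_ofList _ _).1 h))]
      refine (PySem.List.sorted_eq_of_perm_of_pairwise_lt _ _ _ ?_ ?_).symm
      · exact (pvInsert_perm x s).trans
          ((List.Perm.cons x (PySem.List.sorted_perm ..)).trans (List.perm_append_singleton x _).symm)
      · exact pairwise_pvInsert hpair hxs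

-- B's port computed in terms of the invariant
theorem alt_eq (S : String) (K : Int) (hK : 0 ≤ K) :
    c_kth_substring_alt S K =
      PySem.List.pyGetD
        ((PySem.List.sorted (PySem.Set.ofList (pvRaw S K)) (fun x => x) false).take K.toNat)
        (K - 1) "" := by
  unfold c_kth_substring_alt
  rw [← pvFold_inv K hK]
  simp only [pvRaw, List.foldl_flatMap, List.foldl_map, pvStepF, pvStep]

-- A's collected list is pvListA
theorem a_list_eq (S : String) (K : Int) :
    (PySem.List.pyRange 0 (PySem.Str.len S) 1).foldl (fun tmp i =>
      (PySem.List.pyRange (i + 1) (i + K + 1) 1).foldl (fun tmp j =>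
        if j ≤ PySem.Str.len S then tmp ++ [PySem.Str.slice S (some i) (some j)] else tmp) tmp) []
    = pvListA S K := by
  have h1 : ∀ (acc : List String) (i : Int), i ∈ PySem.List.pyRange 0 (PySem.Str.len S) 1 →
      (PySem.List.pyRange (i + 1) (i + K + 1) 1).foldl (fun tmp j =>
        if j ≤ PySem.Str.len S then tmp ++ [PySem.Str.slice S (some i) (some j)] else tmp) acc
      = acc ++ ((PySem.List.pyRange (i + 1) (i + K + 1) 1).filter
          (fun j => decide (j ≤ PySem.Str.len S))).map
          (fun j => PySem.Str.slice S (some i) (some j)) := by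
    intro acc i _
    exact PySem.List.foldl_append_ite _ _ _ _
  exact Eq.trans (PySem.List.foldl_congr_mem _ _ _ _ h1)
    (by rw [PySem.List.foldl_append_eq_flatMap]; simp [pvListA])

theorem a_eq (S : String) (K : Int) :
    c_kth_substring S K =
      PySem.List.pyGetD
        (PySem.List.sorted (PySem.Set.ofList (pvListA S K)) (fun x => x) false) (K - 1) "" := by
  simp only [c_kth_substring]
  rw [a_list_eq]

-- pvSubs (length range capped at len S) has the same members as set(pvRaw)
theorem pvSubs_perm (S : String) (K : Int) :
    (pvSubs S K).Perm (PySem.Set.ofList (pvRaw S K)) := by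
  rw [List.perm_ext_iff_of_nodup (by simp [pvSubs])
      (PySem.Set.nodup_ofList _)]
  intro a
  simp only [pvSubs, PySem.List.dedup_eq_ofList, PySem.Set.mem_ofList, pvRaw, List.mem_flatMap,
    List.mem_map, PySem.List.mem_pyRange_one]
  constructor
  · rintro ⟨L, ⟨hL1, hL2⟩, i, ⟨hi0, hi2⟩, rfl⟩
    exact ⟨L, ⟨by omega, by omega⟩, i, ⟨by omega, by omega⟩, rfl⟩
  · rintro ⟨L, ⟨hL1, hL2⟩, i, ⟨hi0, hi2⟩, rfl⟩
    exact ⟨L, ⟨by omega, by omega⟩, i, ⟨by omega, by omega⟩, rfl⟩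

-- both scans see the same set of substrings
theorem perm_lists (S : String) (K : Int) :
    (PySem.Set.ofList (pvListA S K)).Perm (PySem.Set.ofList (pvRaw S K)) := by
  rw [List.perm_ext_iff_of_nodup (PySem.Set.nodup_ofList _) (PySem.Set.nodup_ofList _)]
  intro a
  simp only [PySem.Set.mem_ofList, pvListA, pvRaw, List.mem_flatMap, List.mem_map,
    List.mem_filter, PySem.List.mem_pyRange_one, decide_eq_true_eq]
  constructor
  · rintro ⟨i, ⟨hi0, hin⟩, j, ⟨⟨hj1, hj2⟩, hjn⟩, rfl⟩
    exact ⟨j - i, ⟨by omega, by omega⟩, i, ⟨by omega, by omega⟩,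
      by rw [show i + (j - i) = j from by omega]⟩
  · rintro ⟨L, ⟨hL1, hL2⟩, i, ⟨hi0, hi2⟩, rfl⟩
    exact ⟨i, ⟨by omega, by omega⟩, i + L, ⟨⟨by omega, by omega⟩, by omega⟩, rfl⟩

-- ===== VERDICT (by name: the statement is the Claim_ definition above) =====
theorem c_kth_substring_spec : Claim_equal_c_kth_substring := by
  unfold Claim_equal_c_kth_substring
  intro S K _ hPre
  obtain ⟨hK1, hK2⟩ := hPre
  unfold Spec_c_kth_substring
  rw [a_eq, alt_eq S K (by omega)]
  rw [PySem.List.sorted_eq_sorted_of_perm _ _ _ (fun a b h => h) (perm_lists S K)]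
  set s := PySem.List.sorted (PySem.Set.ofList (pvRaw S K)) (fun x => x) false with hs
  have hKlen : K ≤ (s.length : Int) := by
    rw [PySem.List.length_sorted, ← (pvSubs_perm S K).length_eq]
    exact hK2
  rw [PySem.List.pyGetD_eq_getElem _ _ (by omega) (by omega),
      PySem.List.pyGetD_eq_getElem _ _ (by omega) (by simp [List.length_take]; omega)]
  exact (List.getElem_take).symm
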